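-- pv_equiv track=rewrite | github.com/c64scene-ar/64k-ought-to-be-enough | tools/parse_ibm_charset.py | parse_2_bits
-- ===== SOURCE A (Python) =====
-- def parse_2_bits(byte):
--     """Parses a quarter of a byte (2 bits) and returns one byte.
--     Useful when using a 16 color video mode.
--     """
--     masks = [0b01, 0b10]
--     # empty is color 0 (0b00)
--     out = 0b00000000
--     for bit in range(len(masks)):
--         mask = byte & masks[bit]
--         if mask != 0:
--             # 0b11 is the color used for the charset
--             out |= 0b1111 << (bit * 4)
--     return out
-- ===== SOURCE B (Python) =====
-- # All four 2-bit patterns mapped to their expanded byte, precomputed once.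
-- _TABLE = (0x00, 0x0F, 0xF0, 0xFF)
--
--
-- def parse_2_bits(byte):
--     """Parses a quarter of a byte (2 bits) and returns one byte.
--     Useful when using a 16 color video mode.
--     """
--     return _TABLE[byte & 3]
-- ===== Notes on version B (the rewrite author's own statement) =====
-- stated objective: simpler
-- what changed: Replaced the loop over a mask list with per-bit conditionals by a single precomputed four-entry lookup table indexed by the two low bits (byte & 3): no iteration, no branches, no bit assembly at run time.
import Mathlib
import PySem

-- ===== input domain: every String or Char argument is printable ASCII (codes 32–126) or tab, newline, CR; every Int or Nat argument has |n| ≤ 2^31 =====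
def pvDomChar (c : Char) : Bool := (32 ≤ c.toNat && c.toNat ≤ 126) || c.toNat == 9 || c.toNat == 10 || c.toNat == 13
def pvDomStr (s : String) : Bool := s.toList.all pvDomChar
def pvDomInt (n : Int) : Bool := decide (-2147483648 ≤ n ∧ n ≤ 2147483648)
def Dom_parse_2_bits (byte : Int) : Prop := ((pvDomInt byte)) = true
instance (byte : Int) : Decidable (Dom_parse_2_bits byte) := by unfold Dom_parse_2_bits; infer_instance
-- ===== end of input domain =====

-- B replaces A's loop over a mask list with one precomputed four-entry lookup table indexed by byte & 3 (objective: simpler).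


-- ===== PORT A =====
def parse_2_bits (byte : Int) : Int :=
  let masks : List Int := [1, 2]
  let out : Int := 0
  (PySem.List.pyRange 0 (masks.length : Int) 1).foldl
    (fun out bit =>
      let mask := PySem.Int.band byte (PySem.List.pyGetD masks bit 0)
      if mask ≠ 0 then PySem.Int.bor out (15 <<< (bit * 4).toNat) else out)
    out

-- ===== PORT B =====
-- the module-level precomputed table _TABLE
def parse2bitsTable : List Int := [0, 15, 240, 255]

-- _TABLE[byte & 3]; the index byte & 3 is always 0..3, so the lookup never raises
def parse_2_bits_alt (byte : Int) : Int :=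
  (PySem.List.pyGet? parse2bitsTable (PySem.Int.band byte 3)).getD 0

-- ===== PRECONDITION & SPEC =====
def Spec_parse_2_bits (byte : Int) (out : Int) : Prop := out = parse_2_bits_alt byte
instance (byte : Int) (out : Int) : Decidable (Spec_parse_2_bits byte out) := by unfold Spec_parse_2_bits; infer_instance

-- ===== CLAIM (what is proved, stated in full; the proofs are below) =====
def Claim_equal_parse_2_bits : Prop := ∀ (byte : Int), Dom_parse_2_bits byte → Spec_parse_2_bits byte (parse_2_bits byte)

-- ===== LEMMAS AND PROOFS =====

theorem natAndTwo (n : Nat) : n &&& 2 = n / 2 % 2 * 2 := by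
  have h2 := Nat.and_two_pow n 1
  rw [Nat.testBit, Nat.shiftRight_eq_div_pow, Nat.and_comm 1, Nat.and_one_is_mod] at h2
  norm_num at h2
  rcases Nat.mod_two_eq_zero_or_one (n / 2) with h | h <;> simp [h] at h2 <;> omega

theorem natAndThree (n : Nat) : n &&& 3 = n % 4 := by
  have := Nat.and_two_pow_sub_one_eq_mod n 2
  norm_num at this; omega

theorem bandtwo (a : Int) : PySem.Int.band a 2 = 2 * (a / 2 % 2) := by
  unfold PySem.Int.band
  by_cases h : 0 ≤ a
  · rw [if_pos h]; norm_num
    rw [show Int.toNat 2 = 2 from rfl]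
    have h3 := natAndTwo a.toNat
    omega
  · rw [if_neg h]; norm_num
    rw [show Int.toNat 2 = 2 from rfl, Nat.and_comm]
    have h3 := natAndTwo ((-a).toNat - 1)
    omega

theorem bandone (a : Int) : PySem.Int.band a 1 = a % 2 := by
  rw [PySem.Int.band_one]; simp [PySem.Int.mod, Int.fmod_eq_emod]

theorem bandthree (a : Int) : PySem.Int.band a 3 = a % 4 := by
  unfold PySem.Int.band
  by_cases h : 0 ≤ a
  · rw [if_pos h]; norm_num
    rw [show Int.toNat 3 = 3 from rfl]
    have h3 := natAndThree a.toNat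
    omega
  · rw [if_neg h]; norm_num
    rw [show Int.toNat 3 = 3 from rfl, Nat.and_comm]
    have h3 := natAndThree ((-a).toNat - 1)
    omega

-- ===== VERDICT (by name: the statement is the Claim_ definition above) =====
theorem parse_2_bits_spec : Claim_equal_parse_2_bits := by
  intro byte _
  unfold Spec_parse_2_bits parse_2_bits parse_2_bits_alt
  have h1 := bandone byte
  have h2 := bandtwo byte
  have h3 := bandthree byte
  simp only [List.length_cons, List.length_nil]
  norm_num
  rw [show PySem.List.pyRange 0 (2 : Int) 1 = [0, 1] from by decide]
  simp only [List.foldl_cons, List.foldl_nil]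
  rw [show PySem.List.pyGetD ([1, 2] : List Int) 0 0 = 1 from rfl,
      show PySem.List.pyGetD ([1, 2] : List Int) 1 0 = 2 from rfl]
  have h4 : byte % 4 = 0 ∨ byte % 4 = 1 ∨ byte % 4 = 2 ∨ byte % 4 = 3 := by omega
  rcases h4 with h4 | h4 | h4 | h4
  · rw [h1, h2, h3, h4, show byte % 2 = 0 from by omega,
        show byte / 2 % 2 = 0 from by omega]; decide
  · rw [h1, h2, h3, h4, show byte % 2 = 1 from by omega,
        show byte / 2 % 2 = 0 from by omega]; decide
  · rw [h1, h2, h3, h4, show byte % 2 = 0 from by omega,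
        show byte / 2 % 2 = 1 from by omega]; decide
  · rw [h1, h2, h3, h4, show byte % 2 = 1 from by omega,
        show byte / 2 % 2 = 1 from by omega]; decide
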